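-- pv_equiv track=rewrite | github.com/pavanyelisetti/leetcode | 2705-minimum-impossible-or/minimum-impossible-or.py | minImpossibleOR
-- ===== SOURCE A (Python) =====
-- from typing import List
--
-- def minImpossibleOR(nums: List[int]) -> int:
--     i=0
--     while(True):
--         x=1<<i
--         if x not in nums:
--             return x
--         i+=1
--
--     return 0
-- ===== SOURCE B (Python) =====
-- from typing import List
--
-- def minImpossibleOR(nums: List[int]) -> int:
--     mask = 0
--     for v in nums:
--         if v > 0 and v & (v - 1) == 0:
--             mask |= v
--     return ~mask & (mask + 1)
-- ===== Notes on version B (the rewrite author's own statement) =====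
-- stated objective: alternative
-- what changed: Instead of testing each power of two against nums with a membership scan in an unbounded while-loop, B makes one pass over nums accumulating a bitmask of the powers of two that occur and returns the lowest clear bit via the closed form ~mask & (mask+1).
import Mathlib
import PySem

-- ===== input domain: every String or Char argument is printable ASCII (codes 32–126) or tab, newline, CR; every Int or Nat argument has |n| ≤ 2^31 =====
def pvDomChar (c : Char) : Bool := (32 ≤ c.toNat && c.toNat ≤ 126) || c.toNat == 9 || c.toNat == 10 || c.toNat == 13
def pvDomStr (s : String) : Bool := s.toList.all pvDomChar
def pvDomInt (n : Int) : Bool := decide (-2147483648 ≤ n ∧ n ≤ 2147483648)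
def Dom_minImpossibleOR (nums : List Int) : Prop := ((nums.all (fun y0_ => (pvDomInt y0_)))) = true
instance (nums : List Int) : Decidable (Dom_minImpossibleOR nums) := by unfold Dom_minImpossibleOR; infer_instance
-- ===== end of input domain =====

-- B replaces A's per-candidate membership scan by one accumulation pass over nums (bitmask of the
-- powers of two present) plus the closed form ~mask & (mask+1) (objective: alternative algorithm).

-- ===== PORT A =====
-- A's 'while True' loop; fuel nums.length + 1 always suffices (proved below), the fuel-0 value 0
-- mirrors A's unreachable final 'return 0'.
def minImpossibleORLoop (nums : List Int) : Nat → Nat → Int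
  | 0, _ => 0
  | fuel + 1, i =>
    let x : Int := 1 <<< i
    if x ∈ nums then minImpossibleORLoop nums fuel (i + 1) else x

def minImpossibleOR (nums : List Int) : Int :=
  minImpossibleORLoop nums (nums.length + 1) 0

-- ===== PORT B =====
def minImpossibleOR_alt (nums : List Int) : Int :=
  let mask : Int := nums.foldl
    (fun mask v => if 0 < v ∧ PySem.Int.band v (v - 1) = 0 then PySem.Int.bor mask v else mask) 0
  PySem.Int.band (Int.not mask) (mask + 1)

-- ===== PRECONDITION & SPEC =====
def Spec_minImpossibleOR (nums : List Int) (out : Int) : Prop := out = minImpossibleOR_alt nums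
instance (nums : List Int) (out : Int) : Decidable (Spec_minImpossibleOR nums out) := by unfold Spec_minImpossibleOR; infer_instance

-- ===== CLAIM (what is proved, stated in full; the proofs are below) =====
def Claim_equal_minImpossibleOR : Prop := ∀ (nums : List Int), Dom_minImpossibleOR nums → Spec_minImpossibleOR nums (minImpossibleOR nums)

-- ===== LEMMAS AND PROOFS =====

-- number of trailing one-bits of a natural number
def pvTrailOnes : Nat → Nat
  | m => if h : m % 2 = 0 then 0 else pvTrailOnes (m / 2) + 1
decreasing_by omega

theorem pvTrailOnes_even (m : Nat) (h : m % 2 = 0) : pvTrailOnes m = 0 := by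
  rw [pvTrailOnes]; simp [h]

theorem pvTrailOnes_odd (m : Nat) (h : m % 2 = 1) : pvTrailOnes m = pvTrailOnes (m / 2) + 1 := by
  rw [pvTrailOnes]; simp [h]

-- bitwise facts on doubled numbers
theorem land_two_mul_add_one_two_mul (a b : Nat) : (2 * a + 1) &&& (2 * b) = 2 * (a &&& b) := by
  apply Nat.eq_of_testBit_eq
  intro i
  cases i with
  | zero =>
    simp [Nat.testBit_zero, Nat.testBit_land, Nat.mul_add_mod, Nat.mul_mod_right]
  | succ i =>
    have h1 : (2 * a + 1) / 2 = a := by omega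
    have h2 : (2 * b) / 2 = b := by omega
    have h3 : (2 * (a &&& b)) / 2 = a &&& b := by omega
    rw [Nat.testBit_land, Nat.testBit_succ, Nat.testBit_succ, Nat.testBit_succ,
      h1, h2, h3, Nat.testBit_land]

theorem land_two_mul_two_mul_add_one (a b : Nat) : (2 * a) &&& (2 * b + 1) = 2 * (a &&& b) := by
  apply Nat.eq_of_testBit_eq
  intro i
  cases i with
  | zero =>
    simp [Nat.testBit_zero, Nat.testBit_land, Nat.mul_add_mod, Nat.mul_mod_right]
  | succ i =>
    have h1 : (2 * a) / 2 = a := by omega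
    have h2 : (2 * b + 1) / 2 = b := by omega
    have h3 : (2 * (a &&& b)) / 2 = a &&& b := by omega
    rw [Nat.testBit_land, Nat.testBit_succ, Nat.testBit_succ, Nat.testBit_succ,
      h1, h2, h3, Nat.testBit_land]

-- (m+1) - ((m+1) &&& m) extracts the lowest clear bit of m
theorem succ_sub_land_eq_pow (m : Nat) : (m + 1) - ((m + 1) &&& m) = 2 ^ pvTrailOnes m := by
  induction m using Nat.strong_induction_on with
  | h m ih =>
    rcases Nat.mod_two_eq_zero_or_one m with hm2 | hm2
    · have hq : m = 2 * (m / 2) := by omega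
      have hand : (m + 1) &&& m = m := by
        rw [hq]
        have h := land_two_mul_add_one_two_mul (m / 2) (m / 2)
        rw [Nat.and_self] at h
        omega
      rw [hand, pvTrailOnes_even m hm2]
      omega
    · have hq : m = 2 * (m / 2) + 1 := by omega
      have hand : (m + 1) &&& m = 2 * ((m / 2 + 1) &&& (m / 2)) := by
        conv_lhs => rw [hq]
        have e : 2 * (m / 2) + 1 + 1 = 2 * (m / 2 + 1) := by ring
        rw [e, land_two_mul_two_mul_add_one]
      have hih := ih (m / 2) (by omega)
      have hle : (m / 2 + 1) &&& (m / 2) ≤ m / 2 + 1 := Nat.and_le_left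
      rw [hand, pvTrailOnes_odd m hm2, pow_succ]
      omega

theorem testBit_lt_trailOnes (m : Nat) : ∀ i < pvTrailOnes m, m.testBit i = true := by
  induction m using Nat.strong_induction_on with
  | h m ih =>
    intro i hi
    rcases Nat.mod_two_eq_zero_or_one m with hm2 | hm2
    · rw [pvTrailOnes_even m hm2] at hi; omega
    · rw [pvTrailOnes_odd m hm2] at hi
      cases i with
      | zero => simp [Nat.testBit_zero, hm2]
      | succ i =>
        rw [Nat.testBit_succ]
        exact ih (m / 2) (by omega) i (by omega)

theorem testBit_at_trailOnes (m : Nat) : m.testBit (pvTrailOnes m) = false := by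
  induction m using Nat.strong_induction_on with
  | h m ih =>
    rcases Nat.mod_two_eq_zero_or_one m with hm2 | hm2
    · rw [pvTrailOnes_even m hm2]
      simp [Nat.testBit_zero]; omega
    · rw [pvTrailOnes_odd m hm2, Nat.testBit_succ]
      exact ih (m / 2) (by omega)

-- 2^k (as a Nat) has no bits in common with 2^k - 1
theorem land_pow_pred (k : Nat) : (2 ^ k) &&& (2 ^ k - 1) = 0 := by
  apply Nat.eq_of_testBit_eq
  intro i
  simp [Nat.testBit_land, Nat.testBit_two_pow, Nat.testBit_two_pow_sub_one]

-- n &&& (n-1) = 0 characterises powers of two among positive naturals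
theorem land_pred_eq_zero_iff_pow (n : Nat) (hn : 0 < n) (h : n &&& (n - 1) = 0) :
    ∃ k, n = 2 ^ k := by
  induction n using Nat.strong_induction_on with
  | h n ih =>
    rcases Nat.mod_two_eq_zero_or_one n with hn2 | hn2
    · have hq0 : 0 < n / 2 := by omega
      have hand : n &&& (n - 1) = 2 * ((n / 2) &&& (n / 2 - 1)) := by
        have hq : n = 2 * (n / 2) := by omega
        conv_lhs => rw [hq]
        have e : 2 * (n / 2) - 1 = 2 * (n / 2 - 1) + 1 := by omega
        rw [e, land_two_mul_two_mul_add_one]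
      obtain ⟨k, hk⟩ := ih (n / 2) (by omega) hq0 (by omega)
      exact ⟨k + 1, by rw [pow_succ]; omega⟩
    · rcases Nat.lt_or_ge n 2 with h1 | h1
      · exact ⟨0, by omega⟩
      · exfalso
        have hand : n &&& (n - 1) = 2 * ((n / 2) &&& (n / 2)) := by
          have hq : n = 2 * (n / 2) + 1 := by omega
          conv_lhs => rw [hq]
          have e : 2 * (n / 2) + 1 - 1 = 2 * (n / 2) := by omega
          rw [e, land_two_mul_add_one_two_mul]
        rw [Nat.and_self] at hand
        omega

-- powers of two are injective over ℤ
theorem int_two_pow_inj {i k : Nat} (h : (2 : Int) ^ i = (2 : Int) ^ k) : i = k := by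
  have h' : (2 ^ i : Nat) = 2 ^ k := by exact_mod_cast h
  exact Nat.pow_right_injective (by norm_num) h'

-- the loop guard of B holds exactly on (positive) powers of two
theorem guard_iff (v : Int) :
    (0 < v ∧ PySem.Int.band v (v - 1) = 0) ↔ ∃ k : Nat, v = 2 ^ k := by
  constructor
  · rintro ⟨hv, hb⟩
    obtain ⟨n, hn⟩ : ∃ n : Nat, v = (n : Int) := ⟨v.toNat, by omega⟩
    have hn0 : 0 < n := by omega
    have hcast : (n : Int) - 1 = ((n - 1 : Nat) : Int) := by omega
    rw [hn, hcast, PySem.Int.band_natCast] at hb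
    have hb' : n &&& (n - 1) = 0 := by exact_mod_cast hb
    obtain ⟨k, hk⟩ := land_pred_eq_zero_iff_pow n hn0 hb'
    exact ⟨k, by rw [hn, hk]; push_cast; ring⟩
  · rintro ⟨k, rfl⟩
    refine ⟨by positivity, ?_⟩
    have h1 : ((2 : Int) ^ k) = ((2 ^ k : Nat) : Int) := by push_cast; ring
    have h2 : ((2 ^ k : Nat) : Int) - 1 = ((2 ^ k - 1 : Nat) : Int) := by
      have : (1 : Nat) ≤ 2 ^ k := Nat.one_le_two_pow
      omega
    rw [h1, h2, PySem.Int.band_natCast, land_pow_pred]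
    rfl

-- the fold of B produces a nonnegative mask whose bit i records whether 2^i occurs in nums
theorem fold_mask (nums : List Int) : ∀ m : Nat,
    ∃ M : Nat,
      nums.foldl
        (fun mask v => if 0 < v ∧ PySem.Int.band v (v - 1) = 0 then PySem.Int.bor mask v else mask)
        (m : Int) = (M : Int) ∧
      ∀ i, M.testBit i = (m.testBit i || decide ((2 : Int) ^ i ∈ nums)) := by
  induction nums with
  | nil => intro m; exact ⟨m, rfl, fun i => by simp⟩
  | cons v rest ih =>
    intro m
    by_cases hg : 0 < v ∧ PySem.Int.band v (v - 1) = 0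
    · obtain ⟨k, rfl⟩ := (guard_iff v).mp hg
      have hcast : ((2 : Int) ^ k) = ((2 ^ k : Nat) : Int) := by push_cast; ring
      have hbor : PySem.Int.bor (m : Int) ((2 : Int) ^ k) = ((m ||| 2 ^ k : Nat) : Int) := by
        rw [hcast, PySem.Int.bor_natCast]
      obtain ⟨M, hM, hbits⟩ := ih (m ||| 2 ^ k)
      refine ⟨M, ?_, ?_⟩
      · simp only [List.foldl_cons, if_pos hg, hbor]; exact hM
      · intro i
        rw [hbits i, Nat.testBit_lor, Nat.testBit_two_pow]
        have hmem : ((2 : Int) ^ i ∈ (2 : Int) ^ k :: rest) ↔ (k = i ∨ (2 : Int) ^ i ∈ rest) := by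
          simp only [List.mem_cons]
          constructor
          · rintro (h | h)
            · exact Or.inl (int_two_pow_inj h.symm)
            · exact Or.inr h
          · rintro (rfl | h)
            · exact Or.inl rfl
            · exact Or.inr h
        by_cases hki : k = i <;> by_cases hr : (2 : Int) ^ i ∈ rest <;>
          simp [hki, hr, hmem]
    · obtain ⟨M, hM, hbits⟩ := ih m
      refine ⟨M, ?_, ?_⟩
      · simp only [List.foldl_cons, if_neg hg]; exact hM
      · intro i
        rw [hbits i]
        have hne : (2 : Int) ^ i ≠ v := by
          intro h
          exact hg (h ▸ (guard_iff v).mpr ⟨i, h.symm⟩)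
        simp [List.mem_cons, hne]

-- evaluating B's closing bit expression on a nonnegative mask
theorem band_not_succ (M : Nat) :
    PySem.Int.band (Int.not (M : Int)) ((M : Int) + 1) = (((M + 1) - ((M + 1) &&& M) : Nat) : Int) := by
  have hnot : Int.not (M : Int) = -(M : Int) - 1 := by
    rw [show Int.not (M : Int) = Int.negSucc M from rfl, Int.negSucc_eq]; ring
  rw [hnot]
  unfold PySem.Int.band
  rw [if_neg (by omega), if_pos (by omega)]
  congr 1
  have h1 : ((M : Int) + 1).toNat = M + 1 := by omega
  have h2 : (-(-(M : Int) - 1) - 1).toNat = M := by omega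
  rw [h1, h2]

-- A's loop returns 2^j when j is the least exponent whose power is missing
theorem aLoop_eq (nums : List Int) (j : Nat) (hj : (2 : Int) ^ j ∉ nums)
    (hmem : ∀ t < j, (2 : Int) ^ t ∈ nums) :
    ∀ fuel i, i ≤ j → j < i + fuel → minImpossibleORLoop nums fuel i = 2 ^ j := by
  intro fuel
  induction fuel with
  | zero => intro i h1 h2; omega
  | succ f ih =>
    intro i h1 h2
    have hx : ((1 : Int) <<< i) = 2 ^ i := by simp [Int.shiftLeft_eq]
    rw [show minImpossibleORLoop nums (f + 1) i
        = (if (1 : Int) <<< i ∈ nums then minImpossibleORLoop nums f (i + 1) else (1 : Int) <<< i)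
      from rfl, hx]

    by_cases hmemi : (2 : Int) ^ i ∈ nums
    · have hij : i ≠ j := fun h => hj (h ▸ hmemi)
      rw [if_pos hmemi]
      exact ih (i + 1) (by omega) (by omega)
    · have hij : i = j := by
        by_contra h
        exact hmemi (hmem i (by omega))
      rw [if_neg hmemi, hij]

-- pigeonhole: if 2^0 .. 2^(j-1) all occur in nums then j ≤ nums.length
theorem pow_list_le (nums : List Int) (j : Nat)
    (hmem : ∀ t < j, (2 : Int) ^ t ∈ nums) : j ≤ nums.length := by
  have hsub : ((List.range j).map (fun t => (2 : Int) ^ t)) ⊆ nums := by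
    intro x hx
    simp only [List.mem_map, List.mem_range] at hx
    obtain ⟨t, ht, rfl⟩ := hx
    exact hmem t ht
  have hnd : ((List.range j).map (fun t => (2 : Int) ^ t)).Nodup :=
    List.Nodup.map (fun a b h => int_two_pow_inj h) List.nodup_range
  have := (List.subperm_of_subset hnd hsub).length_le
  simpa using this

-- ===== VERDICT (by name: the statement is the Claim_ definition above) =====
theorem minImpossibleOR_spec : Claim_equal_minImpossibleOR := by
  intro nums _
  unfold Spec_minImpossibleOR minImpossibleOR minImpossibleOR_alt
  obtain ⟨M, hM, hbits⟩ := fold_mask nums 0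
  simp only [Nat.cast_zero] at hM
  rw [hM, band_not_succ, succ_sub_land_eq_pow]
  have hj : (2 : Int) ^ pvTrailOnes M ∉ nums := by
    intro h
    have hb := hbits (pvTrailOnes M)
    rw [testBit_at_trailOnes, Nat.zero_testBit] at hb
    simp [h] at hb
  have hmem : ∀ t < pvTrailOnes M, (2 : Int) ^ t ∈ nums := by
    intro t ht
    have hb := hbits t
    rw [testBit_lt_trailOnes M t ht, Nat.zero_testBit] at hb
    simpa using hb.symm
  rw [aLoop_eq nums (pvTrailOnes M) hj hmem (nums.length + 1) 0 (Nat.zero_le _)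
    (by have := pow_list_le nums (pvTrailOnes M) hmem; omega)]
  push_cast
  ring
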